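-- pv_equiv track=rewrite | github.com/JBecnel/AdventOfCode2024 | problem22.py | secret
-- ===== SOURCE A (Python) =====
-- def secret(num,iter=10):
--     for i in range(iter):
--         # step 1
--         result = num << 6
--         num = result ^ num
--         num = num % 16777216
--
--         # step 2
--         div_32 = num >> 5
--         num = div_32 ^ num
--         num = num % 16777216
--
--         # step 3
--         shift_11 = num << 11
--         num = shift_11 ^ num
--         num = num % 16777216
--
--     return num
-- ===== SOURCE B (Python) =====
-- # secret: iterate the AoC day-22 PRNG step. Faster: each step is GF(2)-linear on
-- # the 24-bit state, so apply the 24x24 bit-matrix of one step raised to the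
-- # iter-th power by binary exponentiation: O(log iter) matrix ops instead of
-- # O(iter) steps.
--
-- _MASK = 0xFFFFFF
--
--
-- def _step(n):
--     n = (n ^ (n << 6)) & _MASK
--     n = (n ^ (n >> 5)) & _MASK
--     return (n ^ (n << 11)) & _MASK
--
--
-- def _mat_vec(m, v):
--     # m: 24 column masks; v: non-negative bit vector
--     r = 0
--     i = 0
--     while v:
--         if v & 1:
--             r ^= m[i]
--         v >>= 1
--         i += 1
--     return r
--
--
-- def _mat_mul(a, b):
--     return [_mat_vec(a, col) for col in b]
--
--
-- def secret(num, iter=10):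
--     if iter <= 0:
--         return num
--     m = [_step(1 << i) for i in range(24)]   # columns of the one-step matrix
--     p = [1 << i for i in range(24)]          # identity matrix
--     e = iter
--     while e:
--         if e & 1:
--             p = _mat_mul(p, m)
--         m = _mat_mul(m, m)
--         e >>= 1
--     return _mat_vec(p, num & _MASK)
-- ===== Notes on version B (the rewrite author's own statement) =====
-- stated objective: faster
-- what changed: Instead of iterating the xor-shift-mask step iter times, B exploits that each step is GF(2)-linear on the 24-bit state: it builds the 24x24 one-step bit-matrix (as 24 column masks) and raises it to the iter-th power by binary exponentiation, applying the result to the masked input once.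
import Mathlib
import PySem

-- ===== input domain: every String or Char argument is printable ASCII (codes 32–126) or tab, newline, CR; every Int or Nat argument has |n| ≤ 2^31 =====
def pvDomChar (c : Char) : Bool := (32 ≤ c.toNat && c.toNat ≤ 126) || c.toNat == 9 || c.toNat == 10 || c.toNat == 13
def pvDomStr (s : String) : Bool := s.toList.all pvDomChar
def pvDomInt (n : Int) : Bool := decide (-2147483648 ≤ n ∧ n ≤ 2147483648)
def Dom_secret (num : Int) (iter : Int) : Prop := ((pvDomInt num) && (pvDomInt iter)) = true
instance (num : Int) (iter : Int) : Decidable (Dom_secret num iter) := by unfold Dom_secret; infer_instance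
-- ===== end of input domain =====

-- B replaces A's O(iter) per-step PRNG loop by binary exponentiation of the GF(2)
-- 24x24 bit-matrix of one step: O(log iter) matrix operations (measured faster).

-- ===== PORT A =====
-- one body of A's `for` loop (A-side helper, transliterated line by line)
def stepA (num : Int) : Int :=
  let result := num <<< (6:Nat)
  let num1 := PySem.Int.bxor result num
  let num2 := PySem.Int.mod num1 16777216
  let div_32 := num2 >>> (5:Nat)
  let num3 := PySem.Int.bxor div_32 num2
  let num4 := PySem.Int.mod num3 16777216
  let shift_11 := num4 <<< (11:Nat)
  let num5 := PySem.Int.bxor shift_11 num4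
  PySem.Int.mod num5 16777216

def secret (num : Int) (iter : Int) : Int :=
  (PySem.List.pyRange 0 iter 1).foldl (fun n _i => stepA n) num

-- ===== PORT B =====
-- (B works on Nat internally: every value B manipulates after `num & MASK` is a
--  non-negative Python int, and iter > 0 holds on the exponent path.)
def altMask : Nat := 0xFFFFFF

-- B's _step
def altStep (n : Nat) : Nat :=
  let n1 := (n ^^^ (n <<< 6)) &&& altMask
  let n2 := (n1 ^^^ (n1 >>> 5)) &&& altMask
  (n2 ^^^ (n2 <<< 11)) &&& altMask

-- B's _mat_vec while-loop (r = accumulator, i = column index; m[i] via getD: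
-- the index never leaves the 24 real entries on the inputs B reaches)
def altMatVec (m : List Nat) (v i r : Nat) : Nat :=
  if v = 0 then r
  else altMatVec m (v >>> 1) (i + 1) (if v &&& 1 = 1 then r ^^^ m.getD i 0 else r)
  termination_by v
  decreasing_by simp [Nat.shiftRight_one]; omega

-- B's _mat_mul
def altMatMul (a b : List Nat) : List Nat := b.map (fun col => altMatVec a col 0 0)

-- B's while-loop over the exponent
def altPowLoop (p m : List Nat) (e : Nat) : List Nat :=
  if e = 0 then p
  else altPowLoop (if e &&& 1 = 1 then altMatMul p m else p) (altMatMul m m) (e >>> 1)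
  termination_by e
  decreasing_by simp [Nat.shiftRight_one]; omega

def secret_alt (num : Int) (iter : Int) : Int :=
  if iter ≤ 0 then num
  else
    let m := (List.range 24).map (fun i => altStep (1 <<< i))
    let p := (List.range 24).map (fun i => 1 <<< i)
    ((altMatVec (altPowLoop p m iter.toNat) (PySem.Int.band num 16777215).toNat 0 0 : Nat) : Int)

-- ===== PRECONDITION & SPEC =====
def Spec_secret (num : Int) (iter : Int) (out : Int) : Prop := out = secret_alt num iter
instance (num : Int) (iter : Int) (out : Int) : Decidable (Spec_secret num iter out) := by unfold Spec_secret; infer_instance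

-- ===== CLAIM (what is proved, stated in full; the proofs are below) =====
def Claim_equal_secret : Prop := ∀ (num : Int) (iter : Int), Dom_secret num iter → Spec_secret num iter (secret num iter)

-- ===== LEMMAS AND PROOFS =====

theorem pvAddXor (a : Nat) : ∀ b, a &&& b = 0 → a + b = a ^^^ b := by
  induction a using Nat.strong_induction_on with
  | _ a ih =>
    intro b h
    rcases Nat.eq_zero_or_pos a with ha | ha
    · simp [ha]
    have hdiv : a / 2 &&& b / 2 = 0 := by
      rw [← Nat.and_div_two]; simp [h]
    have ih2 := ih (a / 2) (by omega) (b / 2) hdiv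
    have h1 : (a ^^^ b) / 2 = a / 2 + b / 2 := by rw [Nat.xor_div_two, ← ih2]
    have hm2 : (a ^^^ b) % 2 = (a + b) % 2 := Nat.xor_mod_two_eq
    have hpar : a % 2 &&& b % 2 = 0 := by
      have : a % 2 &&& b % 2 = (a &&& b) &&& 1 := by
        rw [← Nat.and_one_is_mod, ← Nat.and_one_is_mod]
        ac_rfl
      simp [this, h]
    have : a % 2 = 0 ∨ b % 2 = 0 := by
      rcases Nat.mod_two_eq_zero_or_one a with h2 | h2 <;> rcases Nat.mod_two_eq_zero_or_one b with h3 | h3 <;> simp_all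
    omega

theorem pvComplSub (k : Nat) (hk : k ≤ altMask) : altMask - k = altMask ^^^ k := by
  have hsub : k &&& altMask = k := by
    have : altMask = 2 ^ 24 - 1 := rfl
    rw [this, Nat.and_two_pow_sub_one_eq_mod, Nat.mod_eq_of_lt (by simp [altMask] at hk; omega)]
  have hd : (altMask ^^^ k) &&& k = 0 := by
    rw [Nat.and_xor_distrib_right, Nat.and_comm altMask k, hsub]
    simp
  have := pvAddXor (altMask ^^^ k) k hd
  rw [Nat.xor_xor_cancel_right] at this
  omega

def sA1 (n : Nat) : Nat := (n ^^^ (n <<< 6)) &&& altMask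

def sA2 (n : Nat) : Nat := (n ^^^ (n >>> 5)) &&& altMask

def sA3 (n : Nat) : Nat := (n ^^^ (n <<< 11)) &&& altMask

theorem altStep_eq (n : Nat) : altStep n = sA3 (sA2 (sA1 n)) := rfl

theorem sA1_lin (x y : Nat) : sA1 (x ^^^ y) = sA1 x ^^^ sA1 y := by
  simp only [sA1, Nat.shiftLeft_xor_distrib, ← Nat.and_xor_distrib_right]
  congr 1; ac_rfl

theorem sA2_lin (x y : Nat) : sA2 (x ^^^ y) = sA2 x ^^^ sA2 y := by
  simp only [sA2, Nat.shiftRight_xor_distrib, ← Nat.and_xor_distrib_right]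
  congr 1; ac_rfl

theorem sA3_lin (x y : Nat) : sA3 (x ^^^ y) = sA3 x ^^^ sA3 y := by
  simp only [sA3, Nat.shiftLeft_xor_distrib, ← Nat.and_xor_distrib_right]
  congr 1; ac_rfl

theorem altStep_lin (x y : Nat) : altStep (x ^^^ y) = altStep x ^^^ altStep y := by
  rw [altStep_eq, altStep_eq, altStep_eq, sA1_lin, sA2_lin, sA3_lin]

theorem altStep_le (n : Nat) : altStep n ≤ altMask := Nat.and_le_right

def Lin (h : Nat → Nat) : Prop := ∀ x y, h (x ^^^ y) = h x ^^^ h y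

def colsOf (h : Nat → Nat) : List Nat := (List.range 24).map (fun j => h (1 <<< j))

theorem lin_zero {h : Nat → Nat} (hl : Lin h) : h 0 = 0 := by
  have := hl 0 0
  simp at this
  omega

-- bit split of a shifted vector

theorem shift_split (v i : Nat) : v <<< i = ((v &&& 1) <<< i) ^^^ ((v >>> 1) <<< (i + 1)) := by
  apply Nat.eq_of_testBit_eq
  intro j
  simp only [Nat.testBit_xor, Nat.testBit_shiftLeft, Nat.testBit_and, Nat.testBit_shiftRight]
  rcases Nat.lt_trichotomy j i with h | h | h
  · simp [Nat.not_le.mpr h, show ¬ (i+1 ≤ j) by omega]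
  · subst h
    simp [show ¬ (j+1 ≤ j) by omega]
  · have h1 : i ≤ j := by omega
    have h2 : i + 1 ≤ j := by omega
    have h3 : ¬ (j - i = 0) := by omega
    have h4 : Nat.testBit 1 (j - i) = false := by
      rw [show (1:Nat) = 2^0 from rfl, Nat.testBit_two_pow]
      simp
      omega
    simp [h1, h2, h4, show 1 + (j - (i+1)) = j - i by omega]

theorem altMatVec_acc (m : List Nat) : ∀ v i r, altMatVec m v i r = r ^^^ altMatVec m v i 0 := by
  intro v
  induction v using Nat.strong_induction_on with
  | _ v ih =>
    intro i r
    conv_lhs => rw [altMatVec]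
    conv_rhs => rw [altMatVec]
    by_cases h : v = 0
    · simp [h]
    · simp only [h, if_false]
      have hlt : v >>> 1 < v := by simp [Nat.shiftRight_one]; omega
      rw [ih _ hlt (i+1) (if v &&& 1 = 1 then r ^^^ m.getD i 0 else r),
          ih _ hlt (i+1) (if v &&& 1 = 1 then 0 ^^^ m.getD i 0 else 0)]
      by_cases hb : v % 2 = 1 <;> simp [Nat.and_one_is_mod, hb, Nat.xor_assoc]

theorem altMatVec_spec (h : Nat → Nat) (hl : Lin h) :
    ∀ v i, v < 2 ^ (24 - i) → i ≤ 24 → altMatVec (colsOf h) v i 0 = h (v <<< i) := by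
  intro v
  induction v using Nat.strong_induction_on with
  | _ v ih =>
    intro i hv hi
    rw [altMatVec]
    by_cases h0 : v = 0
    · simp [h0, lin_zero hl]
    · simp only [h0, if_false]
      have hi24 : i < 24 := by
        by_contra hc
        have : 24 - i = 0 := by omega
        rw [this] at hv
        omega
      have hget : (colsOf h).getD i 0 = h (1 <<< i) := by
        simp [colsOf, List.getD, hi24]
      have hlt : v >>> 1 < v := by simp [Nat.shiftRight_one]; omega
      have hrec : v >>> 1 < 2 ^ (24 - (i+1)) := by
        simp only [Nat.shiftRight_one]
        have : 2 ^ (24 - i) = 2 * 2 ^ (24 - (i+1)) := by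
          rw [← pow_succ']
          congr 1
          omega
        omega
      rw [altMatVec_acc, ih _ hlt (i+1) hrec (by omega), hget]
      rw [shift_split v i, hl ((v &&& 1) <<< i) ((v >>> 1) <<< (i+1))]
      congr 1
      rcases Nat.mod_two_eq_zero_or_one v with hb | hb
      · simp [Nat.and_one_is_mod, hb, lin_zero hl]
      · simp [Nat.and_one_is_mod, hb]

def PRep (mat : List Nat) (h : Nat → Nat) : Prop := mat = colsOf h

theorem PRep_congr {mat h1 h2} (hr : PRep mat h1) (he : ∀ x, h1 x = h2 x) : PRep mat h2 := by
  rw [PRep, hr, colsOf, colsOf]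
  exact List.map_congr_left (fun j _ => he _)

theorem altMatVec_apply {h} (hl : Lin h) (v : Nat) (hv : v < 2 ^ 24) :
    altMatVec (colsOf h) v 0 0 = h v := by
  have := altMatVec_spec h hl v 0 (by simpa) (by omega)
  simpa using this

theorem Lin_comp {f g} (hf : Lin f) (hg : Lin g) : Lin (fun v => f (g v)) := by
  intro x y
  simp only []
  rw [hg x y]
  exact hf _ _

theorem Lin_iterate {f} (hf : Lin f) (k : Nat) : Lin f^[k] := by
  induction k with
  | zero => intro x y; simp
  | succ k ih =>
    intro x y
    rw [Function.iterate_succ_apply', Function.iterate_succ_apply', Function.iterate_succ_apply', ih x y]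
    exact hf _ _

theorem PRep_mul {a b ha hb} (hra : PRep a ha) (hrb : PRep b hb) (hla : Lin ha)
    (hbb : ∀ v, hb v ≤ altMask) : PRep (altMatMul a b) (fun v => ha (hb v)) := by
  rw [PRep, hra, hrb, altMatMul, colsOf, colsOf, colsOf, List.map_map]
  apply List.map_congr_left
  intro j _
  refine altMatVec_apply hla _ ?_
  show hb (1 <<< j) < 2 ^ 24
  have := hbb (1 <<< j)
  have h224 : (2:Nat)^24 = 16777216 := by norm_num
  simp [altMask] at this
  omega

theorem altPowLoop_spec : ∀ (e : Nat) (p m : List Nat) (hp hm : Nat → Nat),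
    PRep p hp → PRep m hm → Lin hp → Lin hm → (∀ v, hm v ≤ altMask) →
    PRep (altPowLoop p m e) (fun v => hp (hm^[e] v)) := by
  intro e
  induction e using Nat.strong_induction_on with
  | _ e ih =>
    intro p m hp hm hrp hrm hlp hlm hbm
    rw [altPowLoop]
    by_cases h0 : e = 0
    · simp only [h0, if_pos]
      exact PRep_congr hrp (by simp)
    · simp only [h0, if_false]
      have hlt : e >>> 1 < e := by simp [Nat.shiftRight_one]; omega
      have hrp' : PRep (if e &&& 1 = 1 then altMatMul p m else p)
          (fun v => hp (hm^[e &&& 1] v)) := by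
        by_cases hb : e &&& 1 = 1
        · simp only [hb, if_pos]
          exact PRep_congr (PRep_mul hrp hrm hlp hbm) (by intro x; simp)
        · have hb0 : e &&& 1 = 0 := by
            rw [Nat.and_one_is_mod] at *
            omega
          simp only [hb0]
          exact PRep_congr hrp (by simp)
      have hrec := ih _ hlt _ (altMatMul m m) _ _ hrp' (PRep_mul hrm hrm hlm hbm)
        (Lin_comp hlp (Lin_iterate hlm _)) (Lin_comp hlm hlm) (fun v => hbm (hm v))
      apply PRep_congr hrec
      intro x
      have h2 : (fun v => hm (hm v)) = hm^[2] := by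
        funext v
        simp [Function.iterate_succ_apply']
      rw [h2, ← Function.iterate_mul]
      rw [← Function.iterate_add_apply]
      congr 2
      rw [Nat.and_one_is_mod, Nat.shiftRight_one]
      omega

def lowBits (x : Int) : Nat := (PySem.Int.band x 16777215).toNat

theorem maskmod (z : Nat) : z % 16777216 = z &&& altMask := by
  have h : altMask = 2 ^ 24 - 1 := by norm_num [altMask]
  rw [h, Nat.and_two_pow_sub_one_eq_mod]

theorem N1pos (n : Nat) : ((n <<< 6) ^^^ n) % 16777216 = sA1 (n &&& 16777215) := by
  rw [maskmod, sA1]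
  apply Nat.eq_of_testBit_eq
  intro i
  rw [show altMask = 2^24-1 from by norm_num [altMask], show (16777215:Nat) = 2^24-1 from by norm_num]
  simp only [Nat.testBit_and, Nat.testBit_xor, Nat.testBit_shiftLeft, Nat.testBit_two_pow_sub_one]
  by_cases h24 : i < 24
  · by_cases h6 : 6 ≤ i
    · simp [h24, h6, show i - 6 < 24 by omega]
      cases n.testBit (i-6) <;> cases n.testBit i <;> simp
    · simp [h24, h6]
  · simp [h24]

theorem N1neg (m : Nat) : ((64*m+63) ^^^ m) % 16777216 = sA1 (altMask ^^^ (m &&& altMask)) := by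
  have hds : (m <<< 6) &&& 63 = 0 := by
    apply Nat.eq_of_testBit_eq
    intro i
    rw [show (63:Nat) = 2^6-1 from by norm_num]
    simp only [Nat.testBit_and, Nat.testBit_shiftLeft, Nat.testBit_two_pow_sub_one, Nat.zero_testBit]
    by_cases h6 : 6 ≤ i <;> simp [h6, show ¬ (i < 6) ↔ 6 ≤ i from by omega]
  have h63 : 64*m+63 = (m <<< 6) ^^^ 63 := by
    rw [← pvAddXor _ _ hds, Nat.shiftLeft_eq]
    ring_nf
  rw [h63, maskmod, sA1]
  apply Nat.eq_of_testBit_eq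
  intro i
  rw [show altMask = 2^24-1 from by norm_num [altMask], show (63:Nat) = 2^6-1 from by norm_num]
  simp only [Nat.testBit_and, Nat.testBit_xor, Nat.testBit_shiftLeft, Nat.testBit_two_pow_sub_one]
  by_cases h24 : i < 24
  · by_cases h6 : 6 ≤ i
    · simp [h24, h6, show ¬ (i < 6) by omega, show i - 6 < 24 by omega]
      cases n0 : m.testBit (i-6) <;> cases m.testBit i <;> simp
    · simp [h24, h6, show i < 6 by omega]
  · simp [h24, show ¬ (i < 6) by omega]

theorem bxor_ofNat (a b : Nat) : PySem.Int.bxor (Int.ofNat a) (Int.ofNat b) = Int.ofNat (a ^^^ b) := by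
  simp [PySem.Int.bxor]

theorem bxor_negSucc (a b : Nat) : PySem.Int.bxor (Int.negSucc a) (Int.negSucc b) = ((a ^^^ b : Nat) : Int) := by
  simp [PySem.Int.bxor, Int.negSucc_eq]; omega

theorem mod_ofNat (a : Nat) : PySem.Int.mod (Int.ofNat a) 16777216 = Int.ofNat (a % 16777216) := by
  exact_mod_cast PySem.Int.mod_natCast a 16777216

theorem lowBits_ofNat (n : Nat) : lowBits (Int.ofNat n) = n &&& 16777215 := by
  simp [lowBits, PySem.Int.band]

theorem lowBits_negSucc (m : Nat) : lowBits (Int.negSucc m) = altMask ^^^ (m &&& altMask) := by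
  have h1 : lowBits (Int.negSucc m) = 16777215 - (16777215 &&& m) := by
    simp [lowBits, PySem.Int.band, Int.negSucc_eq, show ¬((m:Int) ≤ -1) by omega]
  rw [h1, show (16777215:Nat) = altMask from rfl, pvComplSub _ Nat.and_le_left, Nat.and_comm]

theorem st1 (x : Int) :
    PySem.Int.mod (PySem.Int.bxor (x <<< (6:Nat)) x) 16777216 = ((sA1 (lowBits x) : Nat) : Int) := by
  cases x with
  | ofNat n =>
    rw [show (Int.ofNat n) <<< (6:Nat) = Int.ofNat (n <<< 6) from rfl, bxor_ofNat, mod_ofNat,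
        lowBits_ofNat, N1pos]
    rfl
  | negSucc m =>
    rw [show (Int.negSucc m) <<< (6:Nat) = Int.negSucc (64*m+63) from by
          rw [show (Int.negSucc m) <<< (6:Nat) = Int.negSucc ((m+1) <<< 6 - 1) from rfl]
          congr 1
          rw [Nat.shiftLeft_eq]
          omega,
        bxor_negSucc, lowBits_negSucc]
    rw [show ((64*m+63 : Nat) ^^^ m : Nat) = Int.ofNat ((64*m+63) ^^^ m) from rfl, mod_ofNat, N1neg]
    rfl

theorem st2 (a : Nat) : ((a >>> 5) ^^^ a) % 16777216 = sA2 a := by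
  rw [maskmod, sA2, Nat.xor_comm]

theorem st3 (b : Nat) : ((b <<< 11) ^^^ b) % 16777216 = sA3 b := by
  rw [maskmod, sA3, Nat.xor_comm]

theorem stepA_eq (x : Int) : stepA x = ((altStep (lowBits x) : Nat) : Int) := by
  rw [altStep_eq]
  simp only [stepA]
  rw [st1 x]
  rw [show ((sA1 (lowBits x) : Nat) : Int) = Int.ofNat (sA1 (lowBits x)) from rfl]
  rw [show (Int.ofNat (sA1 (lowBits x))) >>> (5:Nat) = Int.ofNat ((sA1 (lowBits x)) >>> 5) from rfl,
      bxor_ofNat, mod_ofNat, st2]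
  rw [show (Int.ofNat (sA2 (sA1 (lowBits x)))) <<< (11:Nat) = Int.ofNat ((sA2 (sA1 (lowBits x))) <<< 11) from rfl,
      bxor_ofNat, mod_ofNat, st3]
  rfl

theorem lowBits_le (x : Int) : lowBits x ≤ altMask := by
  cases x with
  | ofNat n =>
    rw [lowBits_ofNat]
    exact Nat.and_le_right
  | negSucc m =>
    rw [lowBits_negSucc, Nat.and_comm, ← pvComplSub _ Nat.and_le_left]
    omega

theorem lowBits_lt (x : Int) : lowBits x < 2 ^ 24 := by
  have := lowBits_le x
  have h : altMask = 2 ^ 24 - 1 := by norm_num [altMask]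
  omega

theorem lowBits_cast (m : Nat) (hm : m ≤ altMask) : lowBits ((m : Nat) : Int) = m := by
  rw [show ((m : Nat) : Int) = Int.ofNat m from rfl, lowBits_ofNat,
      show (16777215 : Nat) = 2 ^ 24 - 1 from by norm_num, Nat.and_two_pow_sub_one_eq_mod]
  have h : altMask = 2 ^ 24 - 1 := by norm_num [altMask]
  exact Nat.mod_eq_of_lt (by omega)

theorem iterate_le (k v : Nat) : altStep^[k + 1] v ≤ altMask := by
  rw [Function.iterate_succ_apply']
  exact altStep_le _

theorem secret_loop (x : Int) : ∀ k : Nat,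
    (PySem.List.pyRange 0 ((k : Int) + 1) 1).foldl (fun n _i => stepA n) x
      = ((altStep^[k + 1] (lowBits x) : Nat) : Int) := by
  intro k
  induction k with
  | zero =>
    rw [show ((0 : Nat) : Int) + 1 = 1 from by norm_num,
        show PySem.List.pyRange 0 1 1 = [0] from rfl]
    simp [stepA_eq]
  | succ k ih =>
    rw [show ((k + 1 : Nat) : Int) + 1 = ((k : Int) + 1) + 1 from by push_cast; ring,
        PySem.List.pyRange_one_succ_right (by omega : (0:Int) ≤ (k : Int) + 1),
        List.foldl_append, ih]
    simp only [List.foldl]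
    rw [stepA_eq, lowBits_cast _ (iterate_le k _), ← Function.iterate_succ_apply' altStep (k+1) (lowBits x)]

theorem secret_alt_pos (num : Int) (iter : Int) (h : ¬ iter ≤ 0) :
    secret_alt num iter = ((altStep^[iter.toNat] (lowBits num) : Nat) : Int) := by
  simp only [secret_alt, h, if_false]
  have hrep := altPowLoop_spec iter.toNat (colsOf (fun v => v)) (colsOf altStep)
    (fun v => v) altStep rfl rfl (fun x y => rfl) altStep_lin altStep_le
  rw [show (List.range 24).map (fun i => (1:Nat) <<< i) = colsOf (fun v => v) from rfl,
      show (List.range 24).map (fun i => altStep (1 <<< i)) = colsOf altStep from rfl,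
      hrep]
  rw [show (PySem.Int.band num 16777215).toNat = lowBits num from rfl]
  rw [altMatVec_apply (h := fun v => (fun v => v) (altStep^[iter.toNat] v))
      (fun x y => Lin_iterate altStep_lin iter.toNat x y) _ (lowBits_lt num)]

theorem final_eq (num iter : Int) : secret num iter = secret_alt num iter := by
  by_cases h : iter ≤ 0
  · rw [secret, PySem.List.pyRange_one_eq_nil h]
    simp [secret_alt, h]
  · have hiter : iter = ((iter.toNat - 1 : Nat) : Int) + 1 := by omega
    rw [secret_alt_pos num iter h, secret]
    conv_lhs => rw [hiter]
    rw [secret_loop num (iter.toNat - 1)]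
    congr 2
    omega

-- ===== VERDICT (by name: the statement is the Claim_ definition above) =====
theorem secret_spec : Claim_equal_secret := by
  intro num iter _
  exact final_eq num iter
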